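-- pv_equiv track=rewrite | github.com/artbohr/Codewars-Algorithms-Python- | 7-kyu/capitals-first.py | capitals_first
-- ===== SOURCE A (Python) =====
-- def capitals_first(text):
--     upper,lower = [], []
--
--     for x in text.split():
--         if x[0].upper() == x[0] and x[0].isalpha():
--             upper.append(x)
--         elif x[0].lower() == x[0] and x[0].isalpha():
--             lower.append(x)
--
--     return ' '.join(upper+lower)
-- ===== SOURCE B (Python) =====
-- def capitals_first(text):
--     words = [w for w in text.split() if w[0].isalpha()]
--     return ' '.join(sorted(words, key=lambda w: w[0].islower()))
-- ===== Notes on version B (the rewrite author's own statement) =====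
-- stated objective: idiomatic
-- what changed: Replaces the manual two-bucket partition loop with a filter plus a single stable sort keyed on w[0].islower(), relying on sort stability for within-group order.
import Mathlib
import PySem

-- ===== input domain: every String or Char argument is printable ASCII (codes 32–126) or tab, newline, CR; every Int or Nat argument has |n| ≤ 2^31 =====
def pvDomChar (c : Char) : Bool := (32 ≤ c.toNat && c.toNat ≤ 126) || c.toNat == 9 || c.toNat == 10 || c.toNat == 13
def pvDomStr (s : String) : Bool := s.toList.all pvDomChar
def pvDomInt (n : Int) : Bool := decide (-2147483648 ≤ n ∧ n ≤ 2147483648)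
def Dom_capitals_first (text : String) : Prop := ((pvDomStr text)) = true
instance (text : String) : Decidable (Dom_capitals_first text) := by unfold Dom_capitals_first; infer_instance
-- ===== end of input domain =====

-- B replaces A's two-bucket partition loop with filter + one stable sort keyed on w[0].islower(): idiomatic, same result.

-- ===== PORT A =====
-- the loop body of A: classify x by its first character (x[0]; 'none' is unreachable — split() yields nonempty words)
def pvStepA (acc : List String × List String) (x : String) : List String × List String :=
  match PySem.Str.pyGet? x 0 with
  | none => acc
  | some c =>
    if (PySem.Chars.upperChar c == c) && PySem.Chars.isalpha c then (acc.1 ++ [x], acc.2)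
    else if (PySem.Chars.lowerChar c == c) && PySem.Chars.isalpha c then (acc.1, acc.2 ++ [x])
    else acc

def capitals_first (text : String) : String :=
  let ul := (PySem.Str.split₀ text).foldl pvStepA ([], [])
  PySem.Str.join " " (ul.1 ++ ul.2)

-- ===== PORT B =====
-- w[0].isalpha() (false on the empty word, which split() never yields)
def pvAlphaFirst (w : String) : Bool :=
  match PySem.Str.pyGet? w 0 with
  | some c => PySem.Chars.isalpha c
  | none => false

-- the sort key: w[0].islower()
def pvLowerFirst (w : String) : Bool :=
  match PySem.Str.pyGet? w 0 with
  | some c => PySem.Chars.islower c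
  | none => false

def capitals_first_alt (text : String) : String :=
  PySem.Str.join " " (PySem.List.sorted ((PySem.Str.split₀ text).filter pvAlphaFirst) pvLowerFirst false)

-- ===== PRECONDITION & SPEC =====
def Spec_capitals_first (text : String) (out : String) : Prop := out = capitals_first_alt text
instance (text : String) (out : String) : Decidable (Spec_capitals_first text out) := by unfold Spec_capitals_first; infer_instance

-- ===== CLAIM (what is proved, stated in full; the proofs are below) =====
def Claim_equal_capitals_first : Prop := ∀ (text : String), Dom_capitals_first text → Spec_capitals_first text (capitals_first text)

-- ===== LEMMAS AND PROOFS =====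

lemma char_le_iff (a b : Char) : (a ≤ b) ↔ a.toNat ≤ b.toNat := by
  rw [Char.le_def, UInt32.le_iff_toNat_le]; rfl

lemma upper_lower_false (c : Char) :
    PySem.Chars.isupper c = true → PySem.Chars.islower c = false := by
  simp [PySem.Chars.isupper, PySem.Chars.islower, char_le_iff]; omega

lemma lower_upper_false (c : Char) :
    PySem.Chars.islower c = true → PySem.Chars.isupper c = false := by
  simp [PySem.Chars.isupper, PySem.Chars.islower, char_le_iff]; omega

-- A's first branch condition is exactly "first char is an uppercase letter"
lemma condU_eq (c : Char) :
    ((PySem.Chars.upperChar c == c) && PySem.Chars.isalpha c) = PySem.Chars.isupper c := by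
  by_cases h : PySem.Chars.islower c = true
  · have h2 : PySem.Chars.isupper c = false := lower_upper_false c h
    have hlo : 97 ≤ c.toNat ∧ c.toNat ≤ 122 := by
      simp only [PySem.Chars.islower, Bool.and_eq_true, decide_eq_true_eq, char_le_iff] at h
      have ha : 'a'.toNat = 97 := rfl
      have hz : 'z'.toNat = 122 := rfl
      omega
    have hne : PySem.Chars.upperChar c ≠ c := by
      simp only [PySem.Chars.upperChar, h, if_true]
      intro he
      have hv : (Char.ofNat (c.toNat - 32)).toNat = c.toNat - 32 := by
        rw [Char.toNat_ofNat, if_pos (Or.inl (by omega))]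
      rw [he] at hv; omega
    simp [hne, h2]
  · have hc : PySem.Chars.upperChar c = c := by simp [PySem.Chars.upperChar, h]
    simp [hc, PySem.Chars.isalpha, h]

-- A's second branch condition is exactly "first char is a lowercase letter"
lemma condL_eq (c : Char) :
    ((PySem.Chars.lowerChar c == c) && PySem.Chars.isalpha c) = PySem.Chars.islower c := by
  by_cases h : PySem.Chars.isupper c = true
  · have h2 : PySem.Chars.islower c = false := upper_lower_false c h
    have hlo : 65 ≤ c.toNat ∧ c.toNat ≤ 90 := by
      simp only [PySem.Chars.isupper, Bool.and_eq_true, decide_eq_true_eq, char_le_iff] at h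
      have ha : 'A'.toNat = 65 := rfl
      have hz : 'Z'.toNat = 90 := rfl
      omega
    have hne : PySem.Chars.lowerChar c ≠ c := by
      simp only [PySem.Chars.lowerChar, h, if_true]
      intro he
      have hv : (Char.ofNat (c.toNat + 32)).toNat = c.toNat + 32 := by
        rw [Char.toNat_ofNat, if_pos (Or.inl (by omega))]
      rw [he] at hv; omega
    simp [hne, h2]
  · have hc : PySem.Chars.lowerChar c = c := by simp [PySem.Chars.lowerChar, h]
    simp [hc, PySem.Chars.isalpha, h]

-- the upper/lower word predicates A effectively filters with
def pvCondU (w : String) : Bool :=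
  match PySem.Str.pyGet? w 0 with
  | some c => PySem.Chars.isupper c
  | none => false

def pvCondL (w : String) : Bool :=
  match PySem.Str.pyGet? w 0 with
  | some c => PySem.Chars.islower c
  | none => false

lemma foldA (ws : List String) : ∀ u l : List String,
    ws.foldl pvStepA (u, l) = (u ++ ws.filter pvCondU, l ++ ws.filter pvCondL) := by
  induction ws with
  | nil => intro u l; simp
  | cons w ws ih =>
    intro u l
    simp only [List.foldl_cons, List.filter_cons]
    cases hfc : PySem.Str.pyGet? w 0 with
    | none =>
      have hfc' : PySem.List.pyGet? w.toList 0 = none := by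
        simpa [PySem.Str.pyGet?] using hfc
      simp only [pvStepA, hfc]
      rw [ih]
      simp [pvCondU, pvCondL, hfc']
    | some c =>
      have hfc' : PySem.List.pyGet? w.toList 0 = some c := by
        simpa [PySem.Str.pyGet?] using hfc
      by_cases h1 : PySem.Chars.isupper c = true
      · have hb : ((PySem.Chars.upperChar c == c) && PySem.Chars.isalpha c) = true := by
          rw [condU_eq]; exact h1
        simp only [pvStepA, hfc, hb, if_true]
        rw [ih]
        simp [pvCondU, pvCondL, hfc', h1, upper_lower_false c h1]
      · by_cases h2 : PySem.Chars.islower c = true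
        · have hb : ((PySem.Chars.upperChar c == c) && PySem.Chars.isalpha c) = false := by
            rw [condU_eq]; simpa using h1
          have hb2 : ((PySem.Chars.lowerChar c == c) && PySem.Chars.isalpha c) = true := by
            rw [condL_eq]; exact h2
          simp only [pvStepA, hfc, hb, hb2, if_true, Bool.false_eq_true, if_false]
          rw [ih]
          simp [pvCondU, pvCondL, hfc', h2, lower_upper_false c h2]
        · have hb : ((PySem.Chars.upperChar c == c) && PySem.Chars.isalpha c) = false := by
            rw [condU_eq]; simpa using h1
          have hb2 : ((PySem.Chars.lowerChar c == c) && PySem.Chars.isalpha c) = false := by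
            rw [condL_eq]; simpa using h2
          simp only [pvStepA, hfc, hb, hb2, Bool.false_eq_true, if_false]
          rw [ih]
          simp [pvCondU, pvCondL, hfc', h1, h2]

lemma insertBy_append {α : Type} (before : α → α → Bool) (x : α) (F T : List α)
    (h : ∀ y ∈ F, before x y = false) :
    PySem.List.insertBy before x (F ++ T) = F ++ PySem.List.insertBy before x T := by
  induction F with
  | nil => simp
  | cons f F ih =>
    have hf : before x f = false := h f (by simp)
    simp only [List.cons_append, PySem.List.insertBy, hf, Bool.false_eq_true, if_false]
    rw [ih (fun y hy => h y (by simp [hy]))]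

-- a stable sort on a Bool key is the partition: false-key elements first, in order
lemma sorted_bool_key {α : Type} (xs : List α) (key : α → Bool) :
    PySem.List.sorted xs key false = xs.filter (fun x => !key x) ++ xs.filter key := by
  rw [PySem.List.sorted_eq_foldl_insertBy]
  induction xs using List.reverseRecOn with
  | nil => simp
  | append_singleton ws x ih =>
    rw [List.foldl_append, List.foldl_cons, List.foldl_nil, ih]
    cases hx : key x
    · rw [insertBy_append _ _ _ _ (by
        intro y hy
        have : key y = false := by simpa using (List.mem_filter.mp hy).2
        simp [hx, this])]
      cases hT : ws.filter key with
      | nil =>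
        simp [PySem.List.insertBy, List.filter_append, hx, hT]
      | cons t ts =>
        have hkt : key t = true := by
          have : t ∈ ws.filter key := hT ▸ List.mem_cons_self
          exact (List.mem_filter.mp this).2
        have hstep : PySem.List.insertBy (fun a b => decide (key a < key b)) x (t :: ts)
            = x :: t :: ts := by
          simp [PySem.List.insertBy, hx, hkt]
        rw [hstep]
        simp [List.filter_append, hx, hT]
    · rw [PySem.List.insertBy_of_forall_not_before _ _ _ (by
        intro y hy
        cases hky : key y <;> simp [hx])]
      simp [List.filter_append, hx, List.append_assoc]

lemma predU_eq (w : String) : (!pvLowerFirst w && pvAlphaFirst w) = pvCondU w := by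
  unfold pvLowerFirst pvAlphaFirst pvCondU
  cases hfc : PySem.Str.pyGet? w 0 with
  | none => simp
  | some c =>
    simp only [PySem.Chars.isalpha]
    by_cases h : PySem.Chars.islower c = true
    · simp [h, lower_upper_false c h]
    · simp at h
      cases hu : PySem.Chars.isupper c <;> simp [h]

lemma predL_eq (w : String) : (pvLowerFirst w && pvAlphaFirst w) = pvCondL w := by
  unfold pvLowerFirst pvAlphaFirst pvCondL
  cases hfc : PySem.Str.pyGet? w 0 with
  | none => simp
  | some c =>
    simp only [PySem.Chars.isalpha]
    cases h : PySem.Chars.islower c <;> simp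

-- ===== VERDICT (by name: the statement is the Claim_ definition above) =====
theorem capitals_first_spec : Claim_equal_capitals_first := by
  intro text _
  unfold Spec_capitals_first capitals_first capitals_first_alt
  rw [foldA, sorted_bool_key, List.filter_filter, List.filter_filter]
  rw [List.filter_congr (fun w _ => predU_eq w), List.filter_congr (fun w _ => predL_eq w)]
  simp
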